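-- pv_equiv track=rewrite | github.com/TERADA-DANTE/algorithm | python/acmicpc/solved/_10798.py | solution
-- ===== SOURCE A (Python) =====
-- def solution(words):
--     board = [[''] * 15 for _ in range(5)]
--     for i in range(5):
--         l = len(words[i])
--         for j in range(l):
--             board[i][j] = words[i][j]
--     answer = [[''] * 5 for _ in range(15)]
--     for i in range(15):
--         for j in range(5):
--             answer[i][j] = board[j][i]
--     ret = ''
--     for i in range(15):
--         sentence = ''.join(answer[i])
--         ret += sentence
--     return ret
-- ===== SOURCE B (Python) =====
-- def solution(words):
--     out = []
--     for i in range(15):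
--         for j in range(5):
--             if i < len(words[j]):
--                 out.append(words[j][i])
--     return ''.join(out)
-- ===== Notes on version B (the rewrite author's own statement) =====
-- stated objective: simpler
-- what changed: B drops the padded 5x15 board and the 15x5 transpose matrix entirely and emits the answer in one guarded double loop (column index outer, word index inner), appending words[j][i] only when i < len(words[j]).
import Mathlib
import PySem

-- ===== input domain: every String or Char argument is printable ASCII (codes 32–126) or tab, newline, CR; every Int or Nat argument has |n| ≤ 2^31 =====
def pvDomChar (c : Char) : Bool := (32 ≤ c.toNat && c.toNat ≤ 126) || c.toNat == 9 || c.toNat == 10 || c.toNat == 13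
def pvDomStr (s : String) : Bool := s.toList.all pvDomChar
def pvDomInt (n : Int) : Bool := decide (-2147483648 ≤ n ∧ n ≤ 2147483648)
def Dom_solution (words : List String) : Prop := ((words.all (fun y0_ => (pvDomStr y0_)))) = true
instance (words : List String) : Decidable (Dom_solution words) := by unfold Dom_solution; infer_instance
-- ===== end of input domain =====

-- B replaces A's fill-board / transpose-matrix / join pipeline with a single guarded double loop over (column, word); return values only.

-- ===== PORT A =====
-- Board/answer cells are Python 1-char strings (or ''), kept as String.
-- Where Python raises IndexError (words[i] missing, or board[i][j] with j ≥ 15),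
-- the port's `getD ""` / `List.set` no-op are never reached inside Pre_solution.
def boardA (words : List String) : List (List String) :=
  (List.range 5).foldl (fun board i =>
    let w := ((PySem.List.pyGet? words (Int.ofNat i)).getD "").toList
    let l := w.length
    (List.range l).foldl (fun board j =>
      board.set i ((board[i]!).set j (String.ofList [w[j]!]))) board)
    (List.replicate 5 (List.replicate 15 ""))

def answerA (words : List String) : List (List String) :=
  (List.range 15).foldl (fun answer i =>
    (List.range 5).foldl (fun answer j =>
      answer.set i ((answer[i]!).set j ((boardA words)[j]!)[i]!)) answer)
    (List.replicate 15 (List.replicate 5 ""))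

def solution (words : List String) : String :=
  (List.range 15).foldl (fun ret i => ret ++ PySem.Str.join "" ((answerA words)[i]!)) ""

-- ===== PORT B =====
def solution_alt (words : List String) : String :=
  String.ofList ((List.range 15).foldl (fun out i =>
    (List.range 5).foldl (fun out j =>
      let w := ((PySem.List.pyGet? words (Int.ofNat j)).getD "").toList
      if i < w.length then out ++ [w[i]!] else out) out) [])

-- ===== PRECONDITION & SPEC =====
-- Exactly A's return domain: fewer than 5 words (words[i] IndexError) or one of the
-- first 5 words longer than 15 characters (board[i][j] IndexError) make A raise.
def Pre_solution (words : List String) : Prop :=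
  5 ≤ words.length ∧ ∀ w ∈ words.take 5, w.toList.length ≤ 15

instance (words : List String) : Decidable (Pre_solution words) := by
  unfold Pre_solution; infer_instance

def pvWitness_solution : List String := ["abcde", "fg", "", "hijklmnop", "q rs"]

def Spec_solution (words : List String) (out : String) : Prop := out = solution_alt words
instance (words : List String) (out : String) : Decidable (Spec_solution words out) := by unfold Spec_solution; infer_instance

-- ===== CLAIM (what is proved, stated in full; the proofs are below) =====
def Claim_equal_solution : Prop := ∀ (words : List String), Dom_solution words → Pre_solution words → Spec_solution words (solution words)

-- ===== LEMMAS AND PROOFS =====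

-- characters of the j-th word, as both ports read them
def wc (words : List String) (j : Nat) : List Char :=
  ((PySem.List.pyGet? words (Int.ofNat j)).getD "").toList

-- the common normal form: for each column i < 15, the characters words[j][i] of the words long enough
def colChars (words : List String) (i : Nat) : List Char :=
  ((List.range 5).filter (fun j => decide (i < (wc words j).length))).map
    (fun j => (wc words j)[i]!)

-- a loop writing row[j] := g j for j < l, as in A's board fill
theorem fold_set_row {α β : Type} [Inhabited α] (L : List β) (step : List α → β → List α)
    (i : Nat) (ans : List (List α)) (h : i < ans.length) :
    L.foldl (fun a x => a.set i (step (a[i]!) x)) ans = ans.set i (L.foldl step (ans[i]!)) := by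
  induction L generalizing ans with
  | nil =>
    simp only [List.foldl_nil]
    rw [getElem!_pos ans i h, List.set_getElem_self]
  | cons x L ih =>
    simp only [List.foldl_cons]
    rw [ih _ (by simpa using h)]
    simp [h, List.set_set]

theorem fill_length {α : Type} (g : Nat → α) (l : Nat) (init : List α) :
    ((List.range l).foldl (fun r j => r.set j (g j)) init).length = init.length := by
  induction l with
  | zero => simp
  | succ l ih => rw [List.range_succ, List.foldl_append]; simp [ih]

theorem fill_get? {α : Type} (g : Nat → α) (l : Nat) (init : List α) (i : Nat) :
    ((List.range l).foldl (fun r j => r.set j (g j)) init)[i]?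
      = if i < l ∧ i < init.length then some (g i) else init[i]? := by
  induction l with
  | zero => simp
  | succ l ih =>
    rw [List.range_succ, List.foldl_append]
    simp only [List.foldl_cons, List.foldl_nil]
    rw [List.getElem?_set, ih]
    have hlen := fill_length g l init
    rcases eq_or_ne l i with rfl | hne
    · rw [hlen]
      by_cases hi : l < init.length
      · simp [hi]
      · rw [if_pos rfl, if_neg hi, if_neg (by omega), List.getElem?_eq_none_iff.2 (by omega)]
    · rw [if_neg hne]
      split_ifs <;> first | rfl | omega

theorem fill_eq_map {α : Type} (g : Nat → α) (n l : Nat) (d : α) :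
    (List.range l).foldl (fun r j => r.set j (g j)) (List.replicate n d)
      = (List.range n).map (fun i => if i < l then g i else d) := by
  apply List.ext_getElem?
  intro i
  rw [fill_get?]
  by_cases hi : i < n
  · simp only [List.length_replicate]
    rw [List.getElem?_map, List.getElem?_range hi]
    by_cases hl : i < l <;> simp [hl, hi]
  · rw [List.getElem?_eq_none_iff.2 (by simpa using hi),
        List.getElem?_eq_none_iff.2 (by simpa using hi)]
    simp [hi]

-- the outer loop writing matrix row i := row i (old row i), for i < m
theorem outer_fold {α : Type} [Inhabited α] (G : List (List α) → Nat → List (List α))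
    (row : Nat → List α → List α)
    (hG : ∀ a i, i < a.length → G a i = a.set i (row i (a[i]!)))
    (m : Nat) (init : List (List α)) (hm : m ≤ init.length) :
    ∀ k, ((List.range m).foldl G init)[k]? = if k < m then (init[k]?).map (row k) else init[k]? := by
  have len : ∀ m', m' ≤ init.length → ((List.range m').foldl G init).length = init.length := by
    intro m' hm'
    induction m' with
    | zero => simp
    | succ m' ih =>
      rw [List.range_succ, List.foldl_append, List.foldl_cons, List.foldl_nil,
          hG _ m' (by rw [ih (by omega)]; omega)]
      simp [ih (by omega)]
  induction m with
  | zero => simp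
  | succ m ih =>
    intro k
    have hget := ih (by omega)
    rw [List.range_succ, List.foldl_append, List.foldl_cons, List.foldl_nil,
        hG _ m (by rw [len m (by omega)]; omega)]
    rw [List.getElem?_set]
    have hFm : ((List.range m).foldl G init)[m]! = init[m]! := by
      rw [List.getElem!_eq_getElem?_getD, List.getElem!_eq_getElem?_getD, hget m, if_neg (by omega)]
    rcases eq_or_ne m k with rfl | hne
    · rw [if_pos rfl, if_pos (by rw [len m (by omega)]; omega), hFm, if_pos (by omega),
          List.getElem?_eq_getElem (by omega), getElem!_pos init m (by omega)]
      simp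
    · rw [if_neg hne, hget k]
      split_ifs <;> first | rfl | omega

theorem boardA_get (words : List String) (j : Nat) (hj : j < 5) :
    (boardA words)[j]! = (List.range 15).map
      (fun i => if i < (wc words j).length then String.ofList [(wc words j)[i]!] else "") := by
  have hG : ∀ (a : List (List String)) (i : Nat), i < a.length →
      (List.range ((wc words i).length)).foldl (fun board jj =>
          board.set i ((board[i]!).set jj (String.ofList [(wc words i)[jj]!]))) a
      = a.set i ((List.range ((wc words i).length)).foldl
          (fun r jj => r.set jj (String.ofList [(wc words i)[jj]!])) (a[i]!)) :=
    fun a i hi => fold_set_row (List.range ((wc words i).length))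
      (fun r jj => r.set jj (String.ofList [(wc words i)[jj]!])) i a hi
  have h := outer_fold
      (fun a i => (List.range ((wc words i).length)).foldl (fun board jj =>
          board.set i ((board[i]!).set jj (String.ofList [(wc words i)[jj]!]))) a)
      (fun i r => (List.range ((wc words i).length)).foldl
          (fun r jj => r.set jj (String.ofList [(wc words i)[jj]!])) r)
      hG 5 (List.replicate 5 (List.replicate 15 "")) (by simp) j
  have hb : boardA words = (List.range 5).foldl
      (fun a i => (List.range ((wc words i).length)).foldl (fun board jj =>
          board.set i ((board[i]!).set jj (String.ofList [(wc words i)[jj]!]))) a)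
      (List.replicate 5 (List.replicate 15 "")) := rfl
  rw [List.getElem!_eq_getElem?_getD, hb, h, if_pos hj, List.getElem?_replicate, if_pos hj]
  simp only [Option.map_some, Option.getD_some]
  rw [fill_eq_map]

theorem answerA_get (words : List String) (i : Nat) (hi : i < 15) :
    (answerA words)[i]! = (List.range 5).map
      (fun j => if i < (wc words j).length then String.ofList [(wc words j)[i]!] else "") := by
  have hG : ∀ (a : List (List String)) (i : Nat), i < a.length →
      (List.range 5).foldl (fun a jj => a.set i ((a[i]!).set jj ((boardA words)[jj]!)[i]!)) a
      = a.set i ((List.range 5).foldl (fun r jj => r.set jj (((boardA words)[jj]!)[i]!)) (a[i]!)) :=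
    fun a i hi => fold_set_row (List.range 5)
      (fun r jj => r.set jj (((boardA words)[jj]!)[i]!)) i a hi
  have h := outer_fold
      (fun a i => (List.range 5).foldl
        (fun a jj => a.set i ((a[i]!).set jj ((boardA words)[jj]!)[i]!)) a)
      (fun i r => (List.range 5).foldl (fun r jj => r.set jj (((boardA words)[jj]!)[i]!)) r)
      hG 15 (List.replicate 15 (List.replicate 5 "")) (by simp) i
  have ha : answerA words = (List.range 15).foldl
      (fun a i => (List.range 5).foldl
        (fun a jj => a.set i ((a[i]!).set jj ((boardA words)[jj]!)[i]!)) a)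
      (List.replicate 15 (List.replicate 5 "")) := rfl
  rw [List.getElem!_eq_getElem?_getD, ha, h, if_pos hi, List.getElem?_replicate, if_pos hi]
  simp only [Option.map_some, Option.getD_some]
  rw [fill_eq_map]
  apply List.map_congr_left
  intro jj hjj
  simp only [List.mem_range] at hjj
  rw [if_pos hjj, boardA_get words jj hjj]
  rw [getElem!_pos _ i (by simp [hi]), List.getElem_map, List.getElem_range]

theorem str_foldl_toList {β : Type} (L : List β) (f : β → String) (r : String) :
    (L.foldl (fun r x => r ++ f x) r).toList = r.toList ++ L.flatMap (fun x => (f x).toList) := by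
  induction L generalizing r with
  | nil => simp
  | cons x L ih => simp [ih]

theorem chars_join_nil (L : List (List Char)) : PySem.Chars.join [] L = L.flatten := by
  induction L with
  | nil => simp [PySem.Chars.join_nil]
  | cons p L ih =>
    cases L with
    | nil => simp [PySem.Chars.join_singleton]
    | cons q rest => rw [PySem.Chars.join_cons_cons]; simp_all

theorem join_empty_toList (l : List String) :
    (PySem.Str.join "" l).toList = (l.map String.toList).flatten := by
  simp [PySem.Str.join, chars_join_nil]

theorem flatten_map_if {α β : Type} (l : List α) (p : α → Prop) [DecidablePred p] (f : α → β) :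
    (l.map (fun x => if p x then [f x] else [])).flatten
      = (l.filter (fun x => decide (p x))).map f := by
  induction l with
  | nil => simp
  | cons x l ih =>
    by_cases hx : p x <;> simp [hx, ih]

theorem solutionA_toList (words : List String) :
    (solution words).toList = (List.range 15).flatMap (colChars words) := by
  rw [show solution words = (List.range 15).foldl
      (fun ret i => ret ++ PySem.Str.join "" ((answerA words)[i]!)) "" from rfl]
  rw [str_foldl_toList]
  simp only [List.flatMap_def]
  rw [show String.toList "" = [] from rfl, List.nil_append]
  have hmap : ∀ i ∈ List.range 15,
      (PySem.Str.join "" ((answerA words)[i]!)).toList = colChars words i := by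
    intro i hi
    simp only [List.mem_range] at hi
    rw [join_empty_toList, answerA_get words i hi, List.map_map]
    have hcomp : (String.toList ∘ fun j => if i < (wc words j).length
          then String.ofList [(wc words j)[i]!] else "")
        = fun j => if i < (wc words j).length then [(wc words j)[i]!] else [] := by
      funext j
      simp only [Function.comp]
      split_ifs <;> simp
    rw [hcomp, flatten_map_if]
    rfl
  rw [List.map_congr_left hmap]

theorem solutionB_toList (words : List String) :
    (solution_alt words).toList = (List.range 15).flatMap (colChars words) := by
  have hin : ∀ (out : List Char) (i : Nat),
      (List.range 5).foldl (fun out j =>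
        if i < (wc words j).length then out ++ [(wc words j)[i]!] else out) out
      = out ++ colChars words i :=
    fun out i => PySem.List.foldl_append_ite (fun j => i < (wc words j).length)
      (fun j => (wc words j)[i]!) (List.range 5) out
  rw [show solution_alt words = String.ofList ((List.range 15).foldl (fun out i =>
      (List.range 5).foldl (fun out j =>
        if i < (wc words j).length then out ++ [(wc words j)[i]!] else out) out) []) from rfl]
  rw [show (fun (out : List Char) (i : Nat) =>
      (List.range 5).foldl (fun out j =>
        if i < (wc words j).length then out ++ [(wc words j)[i]!] else out) out)
      = (fun out i => out ++ colChars words i) from funext fun o => funext fun i => hin o i]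
  rw [PySem.List.foldl_append_eq_flatMap]
  simp

-- ===== VERDICT (by name: the statement is the Claim_ definition above) =====
theorem solution_spec : Claim_equal_solution := by
  intro words _ _
  unfold Spec_solution
  have h := (solutionA_toList words).trans (solutionB_toList words).symm
  calc solution words = String.ofList (solution words).toList := by simp
    _ = String.ofList (solution_alt words).toList := by rw [h]
    _ = solution_alt words := by simp
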